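-- pv_equiv track=rewrite | github.com/Runder-sun/SceneReVis | utils/batch_render_all.py | find_prompt_index
-- ===== SOURCE A (Python) =====
-- def find_prompt_index(prompt_text, room_type, prompts_map):
--     if room_type not in prompts_map:
--         return None
--
--     target = prompt_text.strip()
--     prompts = prompts_map[room_type]
--
--     try:
--         return prompts.index(target) + 1
--     except ValueError:
--         # Try to find by matching the beginning if exact match fails
--         # (Sometimes prompts in JSON might be truncated or slightly different?)
--         # But based on previous check, it seems exact match works.
--         # Let's try a more robust check just in case
--         for i, p in enumerate(prompts):
--             if p == target:
--                 return i + 1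
--             # If target is a substring of p or vice versa (handling potential truncation)
--             if len(target) > 50 and (target in p or p in target):
--                 return i + 1
--         return None
-- ===== SOURCE B (Python) =====
-- def find_prompt_index(prompt_text, room_type, prompts_map):
--     if room_type not in prompts_map:
--         return None
--     target = prompt_text.strip()
--     matches = [(0 if p == target else 1, i + 1)
--                for i, p in enumerate(prompts_map[room_type])
--                if p == target or (len(target) > 50 and (target in p or p in target))]
--     return min(matches)[1] if matches else None
-- ===== Notes on version B (the rewrite author's own statement) =====
-- stated objective: alternative
-- what changed: Replaces A's try/.index() pass plus separate fallback loop with a filter-then-min formulation: one comprehension collects ranked candidates (0 for exact match, 1 for long-substring match, paired with the 1-based index) and min over the lexicographic pairs picks the answer.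
import Mathlib
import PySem

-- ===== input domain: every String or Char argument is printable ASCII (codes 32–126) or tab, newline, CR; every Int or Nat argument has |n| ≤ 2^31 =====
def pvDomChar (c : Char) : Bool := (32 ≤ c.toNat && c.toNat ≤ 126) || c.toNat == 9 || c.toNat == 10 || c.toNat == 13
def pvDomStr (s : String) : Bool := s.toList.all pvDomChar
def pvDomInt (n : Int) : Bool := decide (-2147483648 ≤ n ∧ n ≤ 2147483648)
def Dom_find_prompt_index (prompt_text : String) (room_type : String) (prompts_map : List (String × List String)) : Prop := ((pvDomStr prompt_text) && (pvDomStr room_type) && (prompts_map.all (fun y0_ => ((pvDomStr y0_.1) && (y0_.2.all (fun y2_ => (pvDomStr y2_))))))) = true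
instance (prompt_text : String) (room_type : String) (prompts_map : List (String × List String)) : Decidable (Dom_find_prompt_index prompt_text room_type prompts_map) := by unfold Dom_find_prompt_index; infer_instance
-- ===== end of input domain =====

-- B replaces A's try/.index()-then-fallback-loop with a filter-then-min over ranked (exactness, 1-based index) pairs (objective: alternative).

-- ===== PORT A =====
-- A's fallback loop: first element that equals target, or (len(target) > 50 and substring either way)
def pvFallbackA (target : String) : List String → Int → Option Int
  | [], _ => none
  | p :: rest, i =>
    if p == target then some (i + 1)
    else if PySem.Str.len target > 50 && (PySem.Str.isIn target p || PySem.Str.isIn p target) then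
      some (i + 1)
    else pvFallbackA target rest (i + 1)

def find_prompt_index (prompt_text : String) (room_type : String) (prompts_map : List (String × List String)) : Option Int :=
  let d : PySem.Dict String (List String) := PySem.Dict.mk prompts_map
  if d.contains room_type = false then none
  else
    let target := PySem.Str.strip prompt_text
    let prompts := (d.get? room_type).getD []
    match PySem.List.index? prompts target with
    | some k => some ((k : Int) + 1)
    | none => pvFallbackA target prompts 0

-- ===== PORT B =====
-- the comprehension's body: keep (rank, i+1) for candidates, rank 0 = exact, 1 = long-substring
def pvRankB (target : String) (q : Int × String) : Option (Int × Int) :=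
  if q.2 == target || (PySem.Str.len target > 50 && (PySem.Str.isIn target q.2 || PySem.Str.isIn q.2 target)) then
    some ((if q.2 == target then (0 : Int) else 1), q.1 + 1)
  else none

def find_prompt_index_alt (prompt_text : String) (room_type : String) (prompts_map : List (String × List String)) : Option Int :=
  let d : PySem.Dict String (List String) := PySem.Dict.mk prompts_map
  if d.contains room_type = false then none
  else
    let target := PySem.Str.strip prompt_text
    let cands := (PySem.List.enumerate ((d.get? room_type).getD [])).filterMap (pvRankB target)
    match PySem.List.min2? cands Prod.fst Prod.snd with
    | some m => some m.2
    | none => none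

-- ===== PRECONDITION & SPEC =====
def Spec_find_prompt_index (prompt_text : String) (room_type : String) (prompts_map : List (String × List String)) (out : Option Int) : Prop := out = find_prompt_index_alt prompt_text room_type prompts_map
instance (prompt_text : String) (room_type : String) (prompts_map : List (String × List String)) (out : Option Int) : Decidable (Spec_find_prompt_index prompt_text room_type prompts_map out) := by unfold Spec_find_prompt_index; infer_instance

-- ===== CLAIM (what is proved, stated in full; the proofs are below) =====
def Claim_equal_find_prompt_index : Prop := ∀ (prompt_text : String) (room_type : String) (prompts_map : List (String × List String)), Dom_find_prompt_index prompt_text room_type prompts_map → Spec_find_prompt_index prompt_text room_type prompts_map (find_prompt_index prompt_text room_type prompts_map)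

-- ===== LEMMAS AND PROOFS =====

-- min2?'s fold step, specialised to fst/snd keys on Int × Int
def pvStep (acc : Option (Int × Int)) (x : Int × Int) : Option (Int × Int) :=
  match acc with
  | none => some x
  | some m =>
    if (decide (x.1 < m.1) || !decide (m.1 < x.1) && decide (x.2 < m.2)) = true then some x else some m

lemma min2?_eq_foldl (xs : List (Int × Int)) :
    PySem.List.min2? xs Prod.fst Prod.snd = xs.foldl pvStep none := by
  unfold PySem.List.min2?
  congr 1
  funext acc x
  cases acc <;> rfl

-- B's candidate list over the enumeration starting at s
def pvMatches (target : String) (prompts : List String) (s : Int) : List (Int × Int) :=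
  (PySem.List.enumerate prompts s).filterMap (pvRankB target)

lemma pvMatches_cons (target p : String) (rest : List String) (s : Int) :
    pvMatches target (p :: rest) s =
      (match pvRankB target (s, p) with
       | some q => q :: pvMatches target rest (s + 1)
       | none => pvMatches target rest (s + 1)) := by
  simp only [pvMatches, PySem.List.enumerate_cons, List.filterMap_cons]
  cases pvRankB target (s, p) <;> simp

-- pvRankB's three outcomes
lemma rankB_exact (target : String) (s : Int) :
    pvRankB target (s, target) = some (0, s + 1) := by
  simp [pvRankB]

lemma rankB_sub (target p : String) (s : Int) (he : ¬ p = target)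
    (hsub : (PySem.Str.len target > 50 && (PySem.Str.isIn target p || PySem.Str.isIn p target)) = true) :
    pvRankB target (s, p) = some (1, s + 1) := by
  have hne : (p == target) = false := beq_eq_false_iff_ne.mpr he
  unfold pvRankB
  rw [hne, hsub]
  rfl

lemma rankB_none (target p : String) (s : Int) (he : ¬ p = target)
    (hsub : ¬ (PySem.Str.len target > 50 && (PySem.Str.isIn target p || PySem.Str.isIn p target)) = true) :
    pvRankB target (s, p) = none := by
  have hne : (p == target) = false := beq_eq_false_iff_ne.mpr he
  have hx : (PySem.Str.len target > 50 && (PySem.Str.isIn target p || PySem.Str.isIn p target)) = false := by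
    cases hb : (PySem.Str.len target > 50 && (PySem.Str.isIn target p || PySem.Str.isIn p target)) with
    | false => rfl
    | true => exact absurd hb hsub
  unfold pvRankB
  rw [hne, hx]
  rfl

-- an exact-match accumulator (0, c) with c ≤ s is never displaced
lemma foldl_step_exact (target : String) (prompts : List String) :
    ∀ (s c : Int), c ≤ s →
      (pvMatches target prompts s).foldl pvStep (some (0, c)) = some (0, c) := by
  induction prompts with
  | nil => intro s c _; simp [pvMatches, PySem.List.enumerate_nil]
  | cons p rest ih =>
    intro s c hc
    rw [pvMatches_cons]
    by_cases he : p = target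
    · subst he
      rw [rankB_exact]
      have hstep : pvStep (some ((0 : Int), c)) (0, s + 1) = some (0, c) := by
        simp [pvStep]; omega
      simp only [List.foldl_cons, hstep]
      exact ih (s + 1) c (by omega)
    · by_cases hsub : (PySem.Str.len target > 50 && (PySem.Str.isIn target p || PySem.Str.isIn p target)) = true
      · rw [rankB_sub target p s he hsub]
        have hstep : pvStep (some ((0 : Int), c)) (1, s + 1) = some (0, c) := by
          simp [pvStep]
        simp only [List.foldl_cons, hstep]
        exact ih (s + 1) c (by omega)
      · rw [rankB_none target p s he hsub]
        exact ih (s + 1) c (by omega)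

-- a substring-match accumulator (1, c) with c ≤ s survives until the first exact match
lemma foldl_step_sub (target : String) (prompts : List String) :
    ∀ (s c : Int), c ≤ s →
      (pvMatches target prompts s).foldl pvStep (some (1, c)) =
        (match PySem.List.index? prompts target with
         | some k => some ((0 : Int), s + (k : Int) + 1)
         | none => some (1, c)) := by
  induction prompts with
  | nil => intro s c _; simp [pvMatches, PySem.List.enumerate_nil, PySem.List.index?]
  | cons p rest ih =>
    intro s c hc
    rw [pvMatches_cons]
    by_cases he : p = target
    · subst he
      rw [PySem.List.index?_cons_self, rankB_exact]
      have hstep : pvStep (some ((1 : Int), c)) (0, s + 1) = some (0, s + 1) := by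
        simp [pvStep]
      simp only [List.foldl_cons, hstep]
      rw [foldl_step_exact _ rest (s + 1) (s + 1) (le_refl _)]
      norm_num
    · rw [PySem.List.index?_cons_of_ne rest he]
      by_cases hsub : (PySem.Str.len target > 50 && (PySem.Str.isIn target p || PySem.Str.isIn p target)) = true
      · rw [rankB_sub target p s he hsub]
        have hstep : pvStep (some ((1 : Int), c)) (1, s + 1) = some (1, c) := by
          simp [pvStep]; omega
        simp only [List.foldl_cons, hstep]
        rw [ih (s + 1) c (by omega)]
        cases hk : PySem.List.index? rest target with
        | none => simp
        | some k => simp only [Option.map_some]; congr 2; push_cast; ring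
      · rw [rankB_none target p s he hsub]
        rw [ih (s + 1) c (by omega)]
        cases hk : PySem.List.index? rest target with
        | none => simp
        | some k => simp only [Option.map_some]; congr 2; push_cast; ring

-- the whole fold from an empty accumulator computes A's result, tagged with its rank
lemma foldl_step_none (target : String) (prompts : List String) :
    ∀ (s : Int),
      (pvMatches target prompts s).foldl pvStep none =
        (match PySem.List.index? prompts target with
         | some k => some ((0 : Int), s + (k : Int) + 1)
         | none => Option.map (fun v => ((1 : Int), v)) (pvFallbackA target prompts s)) := by
  induction prompts with
  | nil => intro s; simp [pvMatches, PySem.List.enumerate_nil, PySem.List.index?, pvFallbackA]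
  | cons p rest ih =>
    intro s
    rw [pvMatches_cons]
    by_cases he : p = target
    · subst he
      rw [PySem.List.index?_cons_self, rankB_exact]
      have hstep : pvStep none (0, s + 1) = some (0, s + 1) := rfl
      simp only [List.foldl_cons, hstep]
      rw [foldl_step_exact _ rest (s + 1) (s + 1) (le_refl _)]
      norm_num
    · have hne : (p == target) = false := beq_eq_false_iff_ne.mpr he
      rw [PySem.List.index?_cons_of_ne rest he]
      have hfb : pvFallbackA target (p :: rest) s =
          (if PySem.Str.len target > 50 && (PySem.Str.isIn target p || PySem.Str.isIn p target) then
            some (s + 1) else pvFallbackA target rest (s + 1)) := by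
        simp [pvFallbackA, hne]
      by_cases hsub : (PySem.Str.len target > 50 && (PySem.Str.isIn target p || PySem.Str.isIn p target)) = true
      · rw [rankB_sub target p s he hsub]
        have hstep : pvStep none (1, s + 1) = some (1, s + 1) := rfl
        simp only [List.foldl_cons, hstep]
        rw [foldl_step_sub _ rest (s + 1) (s + 1) (le_refl _)]
        rw [hfb]
        simp only [hsub, if_true]
        cases hk : PySem.List.index? rest target with
        | none => simp
        | some k => simp only [Option.map_some]; congr 2; push_cast; ring
      · rw [rankB_none target p s he hsub]
        rw [ih (s + 1), hfb]
        simp only [hsub]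
        cases hk : PySem.List.index? rest target with
        | none => rfl
        | some k => simp only [Option.map_some]; congr 2; push_cast; ring

-- ===== VERDICT (by name: the statement is the Claim_ definition above) =====
theorem find_prompt_index_spec : Claim_equal_find_prompt_index := by
  intro prompt_text room_type prompts_map _
  unfold Spec_find_prompt_index find_prompt_index find_prompt_index_alt
  by_cases hc : (PySem.Dict.mk prompts_map).contains room_type = false
  · simp [hc]
  · rw [if_neg hc, if_neg hc]
    show (match PySem.List.index? ((PySem.Dict.get? (PySem.Dict.mk prompts_map) room_type).getD [])
            (PySem.Str.strip prompt_text) with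
          | some k => some ((k : Int) + 1)
          | none => pvFallbackA (PySem.Str.strip prompt_text)
              ((PySem.Dict.get? (PySem.Dict.mk prompts_map) room_type).getD []) 0) =
        (match PySem.List.min2? (pvMatches (PySem.Str.strip prompt_text)
            ((PySem.Dict.get? (PySem.Dict.mk prompts_map) room_type).getD []) 0) Prod.fst Prod.snd with
          | some m => some m.2
          | none => none)
    rw [min2?_eq_foldl, foldl_step_none]
    cases h : PySem.List.index? ((PySem.Dict.get? (PySem.Dict.mk prompts_map) room_type).getD [])
        (PySem.Str.strip prompt_text) with
    | none =>
      cases pvFallbackA (PySem.Str.strip prompt_text)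
          ((PySem.Dict.get? (PySem.Dict.mk prompts_map) room_type).getD []) 0 <;> rfl
    | some k => simp only []; congr 1; omega
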